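-- pv_equiv track=rewrite | github.com/vargadavid304/legal_citations | src/Data_for_histogram_DP_percento.py | find_max_position
-- ===== SOURCE A (Python) =====
-- def find_max_position(arr, threshold):
--     if not arr:
--         return None
--
--     max_index = 0
--     bolo = False
--     for i in range(1, len(arr)):
--         if arr[i] > arr[max_index] and arr[i] > threshold:
--             max_index = i
--             bolo = True
--     if bolo is False and arr[max_index] == 0:
--         return None
--
--     return max_index
-- ===== SOURCE B (Python) =====
-- def find_max_position(arr, threshold):
--     if not arr:
--         return None
--     candidates = [0] + [i for i in range(1, len(arr)) if arr[i] > threshold]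
--     best = max(candidates, key=lambda i: arr[i])
--     if best == 0 and arr[0] == 0:
--         return None
--     return best
-- ===== Notes on version B (the rewrite author's own statement) =====
-- stated objective: alternative
-- what changed: Replaced the fused running-max loop with state (max_index, bolo) by a filter pass building the candidate-index list [0]+[i : arr[i] > threshold] followed by a max() reduction keyed by arr[i] (first maximal index), with the same degenerate guard.
import Mathlib
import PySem

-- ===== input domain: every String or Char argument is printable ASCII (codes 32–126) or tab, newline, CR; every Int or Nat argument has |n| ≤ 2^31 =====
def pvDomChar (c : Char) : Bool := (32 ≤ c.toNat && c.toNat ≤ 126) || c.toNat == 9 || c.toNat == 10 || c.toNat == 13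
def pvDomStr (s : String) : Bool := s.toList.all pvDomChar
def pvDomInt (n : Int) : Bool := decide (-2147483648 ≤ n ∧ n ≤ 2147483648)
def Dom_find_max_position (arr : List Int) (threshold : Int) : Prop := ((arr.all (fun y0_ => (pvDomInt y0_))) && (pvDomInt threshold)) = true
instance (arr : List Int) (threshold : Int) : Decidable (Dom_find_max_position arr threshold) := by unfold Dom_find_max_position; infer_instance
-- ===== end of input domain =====

-- B replaces A's fused running-max loop by a candidate-filter pass followed by a max() reduction
-- (alternative decomposition, same cost); return-value equivalence is proved on all inputs.

-- ===== PORT A =====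
-- arr[i]/arr[max_index] are ported with pyGetD (default 0): all indices the loop uses are in range,
-- so the default is never read and the port is exact.
def find_max_position (arr : List Int) (threshold : Int) : Option Int :=
  if arr = [] then none
  else
    let st := (PySem.List.pyRange 1 arr.length 1).foldl
      (fun (s : Int × Bool) i =>
        if PySem.List.pyGetD arr i 0 > PySem.List.pyGetD arr s.1 0 ∧
           PySem.List.pyGetD arr i 0 > threshold
        then (i, true) else s) ((0 : Int), false)
    if st.2 = false ∧ PySem.List.pyGetD arr st.1 0 = 0 then none
    else some st.1

-- ===== PORT B =====
-- literal port of Source B: candidate list, then Python max with key (PySem.List.max?, first maximal).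
def find_max_position_alt (arr : List Int) (threshold : Int) : Option Int :=
  if arr = [] then none
  else
    let candidates : List Int :=
      0 :: (PySem.List.pyRange 1 arr.length 1).filter
        (fun i => PySem.List.pyGetD arr i 0 > threshold)
    match PySem.List.max? candidates (fun i => PySem.List.pyGetD arr i 0) with
    | none => none  -- unreachable: candidates is nonempty
    | some best =>
      if best = 0 ∧ PySem.List.pyGetD arr 0 0 = 0 then none else some best

-- ===== PRECONDITION & SPEC =====
def Spec_find_max_position (arr : List Int) (threshold : Int) (out : Option Int) : Prop := out = find_max_position_alt arr threshold
instance (arr : List Int) (threshold : Int) (out : Option Int) : Decidable (Spec_find_max_position arr threshold out) := by unfold Spec_find_max_position; infer_instance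

-- ===== CLAIM (what is proved, stated in full; the proofs are below) =====
def Claim_equal_find_max_position : Prop := ∀ (arr : List Int) (threshold : Int), Dom_find_max_position arr threshold → Spec_find_max_position arr threshold (find_max_position arr threshold)

-- ===== LEMMAS AND PROOFS =====

-- Python max over a nonempty list is the running-max foldl (strict '<' on the key, first maximal wins).
theorem pv_max?_cons_foldl (key : Int → Int) :
    ∀ (cs : List Int) (m : Int),
      PySem.List.max? (m :: cs) key =
        some (cs.foldl (fun a x => if key a < key x then x else a) m) := by
  intro cs
  induction cs with
  | nil => intro m; rfl
  | cons x t ih =>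
    intro m
    simp only [PySem.List.max?, List.foldl] at ih ⊢
    by_cases h : key m < key x <;> simp [h, ih]

-- Core invariant: A's pair-state fold over R equals B's running-max fold over the filtered R,
-- and the 'bolo' flag is exactly 'final index ≠ 0' (updates only ever install i ∈ R, i ≠ 0).
theorem pv_fold_equiv (g : Int → Int) (threshold : Int) :
    ∀ (R : List Int), (∀ i ∈ R, i ≠ 0) → ∀ (m : Int) (b : Bool), (b = true ↔ m ≠ 0) →
      (R.foldl (fun (s : Int × Bool) i =>
          if g i > g s.1 ∧ g i > threshold then (i, true) else s) (m, b)).1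
        = (R.filter (fun i => g i > threshold)).foldl
            (fun a x => if g a < g x then x else a) m
      ∧ ((R.foldl (fun (s : Int × Bool) i =>
          if g i > g s.1 ∧ g i > threshold then (i, true) else s) (m, b)).2 = true
        ↔ (R.filter (fun i => g i > threshold)).foldl
            (fun a x => if g a < g x then x else a) m ≠ 0) := by
  intro R
  induction R with
  | nil => intro _ m b hb; simpa using hb
  | cons i t ih =>
    intro hR m b hb
    have hi : i ≠ 0 := hR i (by simp)
    have ht : ∀ j ∈ t, j ≠ 0 := fun j hj => hR j (List.mem_cons_of_mem _ hj)
    rw [List.foldl_cons, List.filter_cons]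
    by_cases hp : g i > threshold
    · by_cases hgt : g i > g m
      · rw [if_pos ⟨hgt, hp⟩, if_pos (by simpa using hp), List.foldl_cons,
            if_pos (show g m < g i from hgt)]
        exact ih ht i true (by simp [hi])
      · rw [if_neg (fun h => hgt h.1), if_pos (by simpa using hp), List.foldl_cons,
            if_neg (show ¬ g m < g i from hgt)]
        exact ih ht m b hb
    · rw [if_neg (fun h => hp h.2), if_neg (by simpa using hp)]
      exact ih ht m b hb

-- ===== VERDICT (by name: the statement is the Claim_ definition above) =====
theorem find_max_position_spec : Claim_equal_find_max_position := by
  intro arr threshold _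
  unfold Spec_find_max_position find_max_position find_max_position_alt
  by_cases hnil : arr = []
  · simp [hnil]
  · simp only [hnil, if_false]
    set g : Int → Int := fun i => PySem.List.pyGetD arr i 0 with hg
    set R : List Int := PySem.List.pyRange 1 arr.length 1 with hRdef
    have hR : ∀ i ∈ R, i ≠ 0 := by
      intro i hi
      have := (PySem.List.mem_pyRange_one).1 (by simpa [hRdef] using hi)
      omega
    have hmax := pv_max?_cons_foldl g (R.filter (fun i => g i > threshold)) 0
    have hmain := pv_fold_equiv g threshold R hR 0 false (by simp)
    -- name the two folds
    set st := R.foldl (fun (s : Int × Bool) i =>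
        if g i > g s.1 ∧ g i > threshold then (i, true) else s) ((0 : Int), false) with hst
    set best := (R.filter (fun i => g i > threshold)).foldl
        (fun a x => if g a < g x then x else a) (0 : Int) with hbest
    obtain ⟨h1, h2⟩ := hmain
    rw [hmax]
    by_cases hz : best = 0
    · have hb2 : st.2 = false := by
        rcases Bool.eq_false_or_eq_true st.2 with h | h
        · exact absurd (h2.1 h) (by simp [hz])
        · exact h
      by_cases h0 : g 0 = 0 <;> simp [hb2, h1, hz]
    · have hb2 : st.2 = true := h2.2 hz
      simp [hb2, h1, hz]
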